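-- pv_equiv track=rewrite | github.com/BasmaKasmi/99_problems | morning_sunshine/solution.py | morning_sunshine
-- ===== SOURCE A (Python) =====
-- def morning_sunshine(numbers : list[int]):
--
--     if numbers != []:
--         Retour = [numbers[-1]]
--         for i in range(2,len(numbers)+1):
--             if numbers[-i] <= Retour[-1]:
--                 continue
--             else:
--                 Retour.append(numbers[-i])
--         Retour.reverse()
--     else:
--         Retour = []
--     return Retour
-- ===== SOURCE B (Python) =====
-- def morning_sunshine(numbers):
--     n = len(numbers)
--     # suffix-max table: sm[i] = max of numbers[i+1:], None when empty
--     sm = [None] * n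
--     best = None
--     for i in range(n - 1, -1, -1):
--         sm[i] = best
--         if best is None or numbers[i] > best:
--             best = numbers[i]
--     return [numbers[i] for i in range(n) if sm[i] is None or numbers[i] > sm[i]]
-- ===== Notes on version B (the rewrite author's own statement) =====
-- stated objective: alternative
-- what changed: Replaces A's single right-to-left scan (running max held as the last kept element, then a final reverse) with a precomputed suffix-maximum table plus a forward filter pass that emits the answer already in original order.
import Mathlib
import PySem

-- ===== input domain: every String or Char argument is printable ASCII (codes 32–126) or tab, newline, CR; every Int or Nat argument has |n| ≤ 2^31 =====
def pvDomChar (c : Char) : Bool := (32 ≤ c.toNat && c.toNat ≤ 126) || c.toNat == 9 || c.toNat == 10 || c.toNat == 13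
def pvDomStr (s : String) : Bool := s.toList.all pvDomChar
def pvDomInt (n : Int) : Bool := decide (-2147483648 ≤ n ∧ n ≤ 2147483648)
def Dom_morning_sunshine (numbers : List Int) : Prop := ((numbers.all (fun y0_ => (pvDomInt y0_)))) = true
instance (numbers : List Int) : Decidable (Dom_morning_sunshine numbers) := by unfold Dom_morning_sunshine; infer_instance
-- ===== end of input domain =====

-- B replaces A's right-to-left scan-and-reverse by a suffix-maximum table plus a forward
-- filter pass (alternative decomposition, same O(n) cost).

-- ===== PORT A =====
-- literal transliteration of A: seed Retour with numbers[-1], loop i = 2 .. len,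
-- append numbers[-i] when it exceeds Retour[-1], finally reverse.
def morning_sunshine (numbers : List Int) : List Int :=
  if numbers = [] then []
  else
    let retour :=
      (PySem.List.pyRange 2 ((numbers.length : Int) + 1) 1).foldl
        (fun r i =>
          if PySem.List.pyGetD numbers (-i) 0 ≤ r.getLast?.getD 0 then r
          else r ++ [PySem.List.pyGetD numbers (-i) 0])
        [PySem.List.pyGetD numbers (-1) 0]
    retour.reverse

-- ===== PORT B =====
-- Source B's right-to-left table build, as structural recursion: returns (sm table, max of list).
def pvSuffixMax : List Int → List (Option Int) × Option Int
  | [] => ([], none)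
  | x :: xs =>
    let p := pvSuffixMax xs
    (p.2 :: p.1, some (match p.2 with | none => x | some b => if x > b then x else b))

-- Source B's forward comprehension: keep numbers[i] when sm[i] is None or numbers[i] > sm[i].
def morning_sunshine_alt (numbers : List Int) : List Int :=
  let sm := (pvSuffixMax numbers).1
  (numbers.zip sm).filterMap
    (fun q => if (match q.2 with
                  | none => true
                  | some b => decide (q.1 > b)) then some q.1 else none)

-- ===== PRECONDITION & SPEC =====
def Spec_morning_sunshine (numbers : List Int) (out : List Int) : Prop := out = morning_sunshine_alt numbers
instance (numbers : List Int) (out : List Int) : Decidable (Spec_morning_sunshine numbers out) := by unfold Spec_morning_sunshine; infer_instance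

-- ===== CLAIM (what is proved, stated in full; the proofs are below) =====
def Claim_equal_morning_sunshine : Prop := ∀ (numbers : List Int), Dom_morning_sunshine numbers → Spec_morning_sunshine numbers (morning_sunshine numbers)

-- ===== LEMMAS AND PROOFS =====

-- optional-max helpers
def pvGt (x : Int) : Option Int → Bool
  | none => true
  | some b => decide (x > b)

def pvOmax : Option Int → Option Int → Option Int
  | none, b => b
  | some a, none => some a
  | some a, some b => some (max a b)

lemma pvOmax_none (m : Option Int) : pvOmax m none = m := by cases m <;> rfl

lemma pvSuffixMax_snd (x : Int) (xs : List Int) :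
    (pvSuffixMax (x :: xs)).2 = pvOmax (some x) (pvSuffixMax xs).2 := by
  simp only [pvSuffixMax, pvOmax]
  cases h : (pvSuffixMax xs).2 with
  | none => rfl
  | some b =>
    simp only []
    congr 1
    by_cases hb : x > b
    · simp [hb, max_eq_left (le_of_lt hb)]
    · simp [hb, max_eq_right (by omega : x ≤ b)]

-- kept-iff-greater-than-(suffix max ⊔ m), structural from the left
def pvLeadT (m : Option Int) : List Int → List Int
  | [] => []
  | x :: xs =>
    if pvGt x (pvOmax (pvSuffixMax xs).2 m) then x :: pvLeadT m xs else pvLeadT m xs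

-- strictly-increasing scan with running threshold, from the left
def pvKeep : Option Int → List Int → List Int
  | _, [] => []
  | m, y :: ys => if pvGt y m then y :: pvKeep (some y) ys else pvKeep m ys

lemma pvOmax_assoc (a b c : Option Int) : pvOmax (pvOmax a b) c = pvOmax a (pvOmax b c) := by
  cases a <;> cases b <;> cases c <;> simp [pvOmax, max_assoc]

lemma pvSuffixMax_snd_append (l : List Int) (x : Int) :
    (pvSuffixMax (l ++ [x])).2 = pvOmax (pvSuffixMax l).2 (some x) := by
  induction l with
  | nil => simp [pvSuffixMax, pvOmax]
  | cons y ys ih =>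
    rw [List.cons_append, pvSuffixMax_snd, ih, pvSuffixMax_snd, pvOmax_assoc]

lemma pvLeadT_append (m : Option Int) (l : List Int) (x : Int) :
    pvLeadT m (l ++ [x]) = pvLeadT (pvOmax (some x) m) l ++ (if pvGt x m then [x] else []) := by
  induction l generalizing m with
  | nil =>
    simp only [List.nil_append, pvLeadT, pvSuffixMax, pvOmax]
  | cons y ys ih =>
    rw [List.cons_append]
    show pvLeadT m (y :: (ys ++ [x])) = _
    rw [pvLeadT, pvLeadT, pvSuffixMax_snd_append, pvOmax_assoc]
    by_cases h : pvGt y (pvOmax (pvSuffixMax ys).2 (pvOmax (some x) m)) = true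
    · rw [if_pos h, if_pos h, ih, List.cons_append]
    · rw [if_neg h, if_neg h, ih]

lemma pvMain (t : List Int) : ∀ m, pvLeadT m t.reverse = (pvKeep m t).reverse := by
  induction t with
  | nil => intro m; rfl
  | cons y ys ih =>
    intro m
    rw [List.reverse_cons, pvLeadT_append, ih, pvKeep]
    by_cases h : pvGt y m = true
    · rw [if_pos h, if_pos h, List.reverse_cons]
      congr 1
      cases m with
      | none => rfl
      | some m' =>
        simp only [pvGt, decide_eq_true_eq] at h
        congr 1
        simp [pvOmax, max_eq_left (le_of_lt h)]
    · rw [if_neg h, if_neg h, List.append_nil]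
      congr 1
      cases m with
      | none => simp [pvGt] at h
      | some m' =>
        simp only [pvGt, decide_eq_true_eq] at h
        simp [pvOmax, max_eq_right (by omega : y ≤ m')]

-- B computes pvLeadT none
lemma pvAlt_eq_leadT (numbers : List Int) : morning_sunshine_alt numbers = pvLeadT none numbers := by
  induction numbers with
  | nil => rfl
  | cons x xs ih =>
    simp only [morning_sunshine_alt] at ih ⊢
    show ((x, (pvSuffixMax xs).2) :: xs.zip (pvSuffixMax xs).1).filterMap _ = _
    rw [List.filterMap_cons, pvLeadT, pvOmax_none]
    cases h : (pvSuffixMax xs).2 with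
    | none => simp only [pvGt, ih]; rfl
    | some b =>
      simp only [pvGt]
      by_cases hb : x > b
      · rw [if_pos (by simpa using hb), if_pos (by simpa using hb), ih]
      · rw [if_neg (by simpa using hb), if_neg (by simpa using hb), ih]

-- A's loop over pyRange 2..n+1 with negative indices = fold over numbers.reverse.drop 1
lemma pvGetNeg (numbers : List Int) (k : Nat) (h1 : 1 ≤ k) (h2 : k ≤ numbers.length) :
    PySem.List.pyGetD numbers (-(k : Int)) 0 = numbers.reverse.getD (k - 1) 0 := by
  have hk : (0:Int) ≤ (numbers.length : Int) + -(k:Int) := by omega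
  simp only [PySem.List.pyGetD, PySem.List.pyGet?, PySem.List.pyIdx?]
  rw [if_neg (by omega), if_pos (by omega)]
  have hidx : numbers.length - (- -(k:Int)).toNat = numbers.length - k := by omega
  rw [hidx, Option.bind_some]
  have hlt : numbers.length - k < numbers.length := by omega
  have hlt' : k - 1 < numbers.reverse.length := by simp; omega
  rw [List.getElem?_eq_getElem hlt, List.getD, List.getElem?_eq_getElem hlt']
  simp only [Option.getD_some]
  rw [List.getElem_reverse]
  congr 1
  omega

lemma pvFoldRangeAux (numbers : List Int) (f : List Int → Int → List Int) :
    ∀ (j k : Nat) (a : List Int), 1 ≤ k → numbers.length + 1 - k ≤ j →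
      (PySem.List.pyRange (k : Int) ((numbers.length : Int) + 1) 1).foldl
        (fun acc i => f acc (PySem.List.pyGetD numbers (-i) 0)) a
      = (numbers.reverse.drop (k - 1)).foldl f a := by
  intro j
  induction j with
  | zero =>
    intro k a hk hj
    rw [PySem.List.pyRange_one_eq_nil (by omega : (numbers.length : Int) + 1 ≤ (k:Int))]
    rw [List.drop_eq_nil_of_le (by rw [List.length_reverse]; omega)]
    rfl
  | succ j ih =>
    intro k a hk hj
    by_cases hle : numbers.length + 1 ≤ k
    · rw [PySem.List.pyRange_one_eq_nil (by omega : (numbers.length : Int) + 1 ≤ (k:Int))]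
      rw [List.drop_eq_nil_of_le (by rw [List.length_reverse]; omega)]
      rfl
    · rw [PySem.List.pyRange_one_cons (by omega : (k:Int) < (numbers.length : Int) + 1)]
      rw [List.foldl_cons]
      have hcast : ((k:Int) + 1) = ((k+1 : Nat) : Int) := by push_cast; ring
      rw [hcast, ih (k+1) _ (by omega) (by omega)]
      have h1 : k - 1 < numbers.reverse.length := by rw [List.length_reverse]; omega
      have hk1 : k - 1 + 1 = k := by omega
      have hdrop : numbers.reverse.drop (k - 1)
          = numbers.reverse.getD (k-1) 0 :: numbers.reverse.drop k := by
        rw [List.drop_eq_getElem_cons h1, hk1, List.getD_eq_getElem _ _ h1]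
      rw [hdrop, List.foldl_cons, pvGetNeg numbers k hk (by omega)]
      congr 1

lemma pvFoldRange (numbers : List Int) (f : List Int → Int → List Int)
    (k : Nat) (a : List Int) (hk : 1 ≤ k) :
    (PySem.List.pyRange (k : Int) ((numbers.length : Int) + 1) 1).foldl
        (fun acc i => f acc (PySem.List.pyGetD numbers (-i) 0)) a
      = (numbers.reverse.drop (k - 1)).foldl f a :=
  pvFoldRangeAux numbers f (numbers.length + 1 - k) k a hk le_rfl

-- A's loop body with last-kept element m extends acc by the increasing scan
lemma pvFoldKeep (t : List Int) : ∀ (acc : List Int) (m : Int), acc.getLast? = some m →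
    t.foldl (fun r y => if y ≤ r.getLast?.getD 0 then r else r ++ [y]) acc
      = acc ++ pvKeep (some m) t := by
  induction t with
  | nil => intro acc m _; simp [pvKeep]
  | cons y ys ih =>
    intro acc m hm
    rw [List.foldl_cons, pvKeep]
    by_cases h : y ≤ m
    · rw [if_pos (by rw [hm]; simpa using h)]
      rw [if_neg (by simp [pvGt]; omega)]
      exact ih acc m hm
    · rw [if_neg (by rw [hm]; simpa using h)]
      rw [if_pos (by simp [pvGt]; omega)]
      rw [ih (acc ++ [y]) y (by simp)]
      simp

-- ===== VERDICT (by name: the statement is the Claim_ definition above) =====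
theorem morning_sunshine_spec : Claim_equal_morning_sunshine := by
  intro numbers _
  unfold Spec_morning_sunshine
  rw [pvAlt_eq_leadT]
  by_cases hnil : numbers = []
  · subst hnil; rfl
  · unfold morning_sunshine
    rw [if_neg hnil]
    have hrev : numbers.reverse ≠ [] := by simpa using hnil
    obtain ⟨x, t, hxt⟩ := List.exists_cons_of_ne_nil hrev
    have hlen : 1 ≤ numbers.length := by
      cases numbers with
      | nil => exact absurd rfl hnil
      | cons _ _ => simp
    have hget1 : PySem.List.pyGetD numbers (-1 : Int) 0 = x := by
      have h := pvGetNeg numbers 1 le_rfl hlen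
      rw [hxt] at h
      simpa using h
    have hfold := pvFoldRange numbers
        (fun r y => if y ≤ r.getLast?.getD 0 then r else r ++ [y]) 2
        [PySem.List.pyGetD numbers (-1 : Int) 0] (by omega)
    rw [hxt] at hfold
    show ((PySem.List.pyRange ((2:Nat) : Int) ((numbers.length : Int) + 1) 1).foldl
        (fun acc i => (fun r y => if y ≤ r.getLast?.getD 0 then r else r ++ [y]) acc
          (PySem.List.pyGetD numbers (-i) 0))
        [PySem.List.pyGetD numbers (-1 : Int) 0]).reverse = pvLeadT none numbers
    rw [hfold, hget1]
    show (t.foldl _ [x]).reverse = _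
    rw [pvFoldKeep t [x] x (by simp)]
    have hlead : pvLeadT none numbers = pvLeadT none (x :: t).reverse := by rw [← hxt]; simp
    rw [hlead, List.reverse_cons, pvLeadT_append, pvMain]
    simp [pvGt, pvOmax]
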